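-- pv_equiv track=rewrite | github.com/mo9mo9-uwu-mo9mo9/Kumihan-Formatter | kumihan_formatter/parsers/list/list_utils.py | validate_definition_format
-- ===== SOURCE A (Python) =====
-- from typing import Any, Dict, List, Optional, Tuple
--
-- def validate_definition_format(content: str) -> List[str]:
--     """定義リスト形式の検証"""
--     errors = []
--     lines = content.split("\n")
--
--     i = 0
--     while i < len(lines):
--         line = lines[i]
--         if line.strip().endswith(":") and not line.startswith(" "):
--             # 定義項目が見つかった
--             i += 1
--             has_definition = False
--
--             # 次の行から定義内容をチェック
--             while i < len(lines) and (
--                 lines[i].startswith((" ", "\t")) or not lines[i].strip()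
--             ):
--                 if lines[i].strip():
--                     has_definition = True
--                 i += 1
--
--             if not has_definition:
--                 errors.append(
--                     f"定義項目 '{line.strip()}' に対応する定義内容がありません"
--                 )
--         else:
--             i += 1
--
--     return errors
-- ===== SOURCE B (Python) =====
-- def validate_definition_format(content: str):
--     """定義リスト形式の検証 — single state-machine pass (pending header + has_def flag)."""
--     errors = []
--     pending = None
--     has_def = False
--     for line in content.split("\n"):
--         stripped = line.strip()
--         if pending is not None:
--             if line.startswith((" ", "\t")) or not stripped:
--                 if stripped:
--                     has_def = True
--                 continue
--             if not has_def:
--                 errors.append(f"定義項目 '{pending}' に対応する定義内容がありません")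
--             pending = None
--         if stripped.endswith(":") and not line.startswith(" "):
--             pending = stripped
--             has_def = False
--     if pending is not None and not has_def:
--         errors.append(f"定義項目 '{pending}' に対応する定義内容がありません")
--     return errors
-- ===== Notes on version B (the rewrite author's own statement) =====
-- stated objective: simpler
-- what changed: Replaced A's index-driven outer while with a nested inner consume-loop by a single for pass over the lines holding a pending-header + has_def state machine with an end-of-input flush.
import Mathlib
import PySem

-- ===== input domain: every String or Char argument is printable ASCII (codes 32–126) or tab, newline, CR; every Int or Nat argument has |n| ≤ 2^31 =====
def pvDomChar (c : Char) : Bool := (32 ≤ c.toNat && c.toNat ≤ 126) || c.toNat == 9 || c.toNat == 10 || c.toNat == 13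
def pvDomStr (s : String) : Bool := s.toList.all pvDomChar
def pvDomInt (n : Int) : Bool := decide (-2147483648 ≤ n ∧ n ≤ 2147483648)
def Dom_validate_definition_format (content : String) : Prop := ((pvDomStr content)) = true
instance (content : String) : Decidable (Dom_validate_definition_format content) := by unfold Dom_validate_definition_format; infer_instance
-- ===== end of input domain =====

-- B replaces A's index-based outer/inner while loops by one for-loop state machine (pending header + has_def) with a final flush; same O(n), simpler.

-- error message (the same f-string in both Pythons)
def pvMsg (s : String) : String := "定義項目 '" ++ s ++ "' に対応する定義内容がありません"

-- ===== PORT A =====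
-- inner while: consume content lines, tracking has_definition
def pvConsumeA : List String → Bool → Bool × List String
  | [], h => (h, [])
  | l :: rest, h =>
    if PySem.Str.startswith l " " || PySem.Str.startswith l "\t" || PySem.Str.strip l == "" then
      pvConsumeA rest (if PySem.Str.strip l != "" then true else h)
    else (h, l :: rest)

theorem pvConsumeA_len : ∀ (l : List String) (h : Bool), (pvConsumeA l h).2.length ≤ l.length := by
  intro l
  induction l with
  | nil => intro h; simp [pvConsumeA]
  | cons x xs ih =>
    intro h
    simp only [pvConsumeA]
    split
    · exact Nat.le_trans (ih _) (Nat.le_succ _)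
    · simp

-- outer while over the remaining lines
def pvGoA : List String → List String → List String
  | [], errors => errors
  | line :: rest, errors =>
    if PySem.Str.endswith (PySem.Str.strip line) ":" && !(PySem.Str.startswith line " ") then
      let r := pvConsumeA rest false
      pvGoA r.2 (if !r.1 then errors ++ [pvMsg (PySem.Str.strip line)] else errors)
    else pvGoA rest errors
termination_by l => l.length
decreasing_by
  · exact Nat.lt_succ_of_le (pvConsumeA_len rest false)
  · simp

def validate_definition_format (content : String) : List String :=
  pvGoA ((PySem.Str.split? content "\n").getD []) []  -- split? is some for sep ≠ ""; getD only discharges the Option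

-- ===== PORT B =====
-- one step of B's for-loop: state = (errors, pending header, has_def)
def pvStepB (st : List String × Option String × Bool) (line : String) :
    List String × Option String × Bool :=
  let stripped := PySem.Str.strip line
  match st with
  | (errors, some p, hasDef) =>
    if PySem.Str.startswith line " " || PySem.Str.startswith line "\t" || stripped == "" then
      (errors, some p, if stripped != "" then true else hasDef)
    else
      let errors' := if !hasDef then errors ++ [pvMsg p] else errors
      if PySem.Str.endswith stripped ":" && !(PySem.Str.startswith line " ") then
        (errors', some stripped, false)
      else (errors', none, hasDef)
  | (errors, none, hasDef) =>
    if PySem.Str.endswith stripped ":" && !(PySem.Str.startswith line " ") then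
      (errors, some stripped, false)
    else (errors, none, hasDef)

-- final flush after the loop
def pvFlushB : List String × Option String × Bool → List String
  | (errors, some p, hasDef) => if !hasDef then errors ++ [pvMsg p] else errors
  | (errors, none, _) => errors

def validate_definition_format_alt (content : String) : List String :=
  pvFlushB (((PySem.Str.split? content "\n").getD []).foldl pvStepB ([], none, false))

-- ===== PRECONDITION & SPEC =====
def Spec_validate_definition_format (content : String) (out : List String) : Prop := out = validate_definition_format_alt content
instance (content : String) (out : List String) : Decidable (Spec_validate_definition_format content out) := by unfold Spec_validate_definition_format; infer_instance

-- ===== CLAIM (what is proved, stated in full; the proofs are below) =====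
def Claim_equal_validate_definition_format : Prop := ∀ (content : String), Dom_validate_definition_format content → Spec_validate_definition_format content (validate_definition_format content)

-- ===== LEMMAS AND PROOFS =====

-- joint invariant: with no pending header B's fold-then-flush equals A's outer loop (for any has_def);
-- with a pending header it equals A's inner consume followed by the flush and the outer loop.
theorem pvMain : ∀ (n : Nat) (lines : List String), lines.length = n →
    (∀ (errors : List String) (h : Bool),
      pvFlushB (lines.foldl pvStepB (errors, none, h)) = pvGoA lines errors) ∧
    (∀ (p : String) (h : Bool) (errors : List String),
      pvFlushB (lines.foldl pvStepB (errors, some p, h)) =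
        pvGoA (pvConsumeA lines h).2
          (if !(pvConsumeA lines h).1 then errors ++ [pvMsg p] else errors)) := by
  intro n
  induction n with
  | zero =>
    intro lines hl
    have : lines = [] := List.eq_nil_of_length_eq_zero hl
    subst this
    constructor
    · intro errors h; simp [pvFlushB, pvGoA]
    · intro p h errors; simp [pvFlushB, pvConsumeA, pvGoA]
  | succ n ih =>
    intro lines hl
    match lines with
    | line :: rest =>
      have hr : rest.length = n := by simpa using hl
      obtain ⟨ih1, ih2⟩ := ih rest hr
      constructor
      · intro errors h
        by_cases hh : (PySem.Str.endswith (PySem.Str.strip line) ":" &&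
            !(PySem.Str.startswith line " ")) = true
        · have hstep : pvStepB (errors, none, h) line = (errors, some (PySem.Str.strip line), false) := by
            simp only [pvStepB]; rw [if_pos hh]
          rw [List.foldl_cons, hstep, ih2]
          simp only [pvGoA]
          rw [if_pos hh]
        · have hstep : pvStepB (errors, none, h) line = (errors, none, h) := by
            simp only [pvStepB]; rw [if_neg hh]
          rw [List.foldl_cons, hstep, ih1]
          simp only [pvGoA]
          rw [if_neg hh]
      · intro p h errors
        by_cases hc : (PySem.Str.startswith line " " || PySem.Str.startswith line "\t" ||
            PySem.Str.strip line == "") = true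
        · have hstep : pvStepB (errors, some p, h) line =
              (errors, some p, if PySem.Str.strip line != "" then true else h) := by
            simp only [pvStepB]; rw [if_pos hc]
          rw [List.foldl_cons, hstep, ih2]
          have hcons : pvConsumeA (line :: rest) h =
              pvConsumeA rest (if PySem.Str.strip line != "" then true else h) := by
            simp only [pvConsumeA]; rw [if_pos hc]
          rw [hcons]
        · have hcons : pvConsumeA (line :: rest) h = (h, line :: rest) := by
            simp only [pvConsumeA]; rw [if_neg hc]
          rw [hcons]
          by_cases hh : (PySem.Str.endswith (PySem.Str.strip line) ":" &&
              !(PySem.Str.startswith line " ")) = true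
          · have hstep : pvStepB (errors, some p, h) line =
                ((if !h then errors ++ [pvMsg p] else errors), some (PySem.Str.strip line), false) := by
              simp only [pvStepB]; rw [if_neg hc, if_pos hh]
            rw [List.foldl_cons, hstep, ih2]
            simp only [pvGoA]
            rw [if_pos hh]
          · have hstep : pvStepB (errors, some p, h) line =
                ((if !h then errors ++ [pvMsg p] else errors), none, h) := by
              simp only [pvStepB]; rw [if_neg hc, if_neg hh]
            rw [List.foldl_cons, hstep, ih1]
            simp only [pvGoA]
            rw [if_neg hh]

-- ===== VERDICT (by name: the statement is the Claim_ definition above) =====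
theorem validate_definition_format_spec : Claim_equal_validate_definition_format := by
  intro content _
  unfold Spec_validate_definition_format validate_definition_format validate_definition_format_alt
  exact ((pvMain ((PySem.Str.split? content "\n").getD []).length _ rfl).1 [] false).symm
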